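-- pv_equiv track=rewrite | github.com/saba-tandashvili/GOA | Day 58/classwork/homework2.py | remove_largest
-- ===== SOURCE A (Python) =====
-- def remove_largest(lst, value):
--     if not lst:
--         return []
--     largest = max(lst)
--     lst.remove(largest)
--     if largest == value:
--         return lst
--     return remove_largest(lst, value)
-- ===== SOURCE B (Python) =====
-- def remove_largest(lst, value):
--     # Return value only: A also mutates lst in place; B does not.
--     if value not in lst:
--         return []
--     out = []
--     removed = False
--     for x in lst:
--         if x > value:
--             continue
--         if x == value and not removed:
--             removed = True
--             continue
--         out.append(x)
--     return out
-- ===== Notes on version B (the rewrite author's own statement) =====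
-- stated objective: faster
-- what changed: Replaced the recursive repeated max+remove process with a single membership test plus one linear pass that drops every element greater than value and the first occurrence of value; equivalence is about the return value only (A mutates lst in place, B does not).
import Mathlib
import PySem

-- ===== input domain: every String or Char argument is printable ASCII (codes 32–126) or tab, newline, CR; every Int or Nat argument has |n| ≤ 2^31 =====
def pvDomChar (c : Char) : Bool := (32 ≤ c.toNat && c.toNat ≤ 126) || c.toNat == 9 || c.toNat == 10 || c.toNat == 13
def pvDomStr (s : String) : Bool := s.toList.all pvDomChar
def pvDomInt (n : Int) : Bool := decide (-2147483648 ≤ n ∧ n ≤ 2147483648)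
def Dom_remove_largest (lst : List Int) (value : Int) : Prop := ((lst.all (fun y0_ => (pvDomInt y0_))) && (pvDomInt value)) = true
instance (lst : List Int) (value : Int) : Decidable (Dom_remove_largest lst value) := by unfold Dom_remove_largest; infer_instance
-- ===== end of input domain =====

-- B replaces A's recursive repeated max+remove with one membership test and one linear pass
-- (objective: faster, O(n) vs O(n^2)); equivalence is about the RETURN value only — A mutates
-- lst in place, B does not.

-- ===== PORT A =====
def remove_largest (lst : List Int) (value : Int) : List Int :=
  if _hne : lst = [] then []
  else
    match _h1 : PySem.List.max? lst (fun x => x) with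
    | none => []  -- unreachable: lst ≠ []
    | some largest =>
      match _h2 : PySem.List.remove? lst largest with
      | none => []  -- unreachable: largest ∈ lst
      | some rest =>
        if largest = value then rest
        else remove_largest rest value
termination_by lst.length
decreasing_by
  have hm : largest ∈ lst := PySem.List.max?_mem _h1
  have : PySem.List.remove? lst largest = some (lst.erase largest) :=
    PySem.List.remove?_eq_some_erase lst largest hm
  have hrest : rest = lst.erase largest := by
    rw [_h2] at this; exact (Option.some.inj this)
  rw [hrest, List.length_erase_of_mem hm]
  exact Nat.sub_lt (List.length_pos_of_mem hm) one_pos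

-- ===== PORT B =====
def remove_largest_alt (lst : List Int) (value : Int) : List Int :=
  if value ∈ lst then
    (lst.foldl (fun (acc : List Int × Bool) x =>
      if value < x then acc
      else if x = value ∧ acc.2 = false then (acc.1, true)
      else (acc.1 ++ [x], acc.2)) ([], false)).1
  else []

-- ===== PRECONDITION & SPEC =====
def Spec_remove_largest (lst : List Int) (value : Int) (out : List Int) : Prop := out = remove_largest_alt lst value
instance (lst : List Int) (value : Int) (out : List Int) : Decidable (Spec_remove_largest lst value out) := by unfold Spec_remove_largest; infer_instance

-- ===== CLAIM (what is proved, stated in full; the proofs are below) =====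
def Claim_equal_remove_largest : Prop := ∀ (lst : List Int) (value : Int), Dom_remove_largest lst value → Spec_remove_largest lst value (remove_largest lst value)

-- ===== LEMMAS AND PROOFS =====

-- B's loop, with the accumulator made structural: flag b = "one occurrence of value already dropped".
def rlGo (value : Int) : List Int → Bool → List Int
  | [], _ => []
  | x :: xs, b =>
    if value < x then rlGo value xs b
    else if x = value ∧ b = false then rlGo value xs true
    else x :: rlGo value xs b

theorem rlGo_foldl (value : Int) (l : List Int) (acc : List Int) (b : Bool) :
    (l.foldl (fun (acc : List Int × Bool) x =>
      if value < x then acc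
      else if x = value ∧ acc.2 = false then (acc.1, true)
      else (acc.1 ++ [x], acc.2)) (acc, b)).1 = acc ++ rlGo value l b := by
  induction l generalizing acc b with
  | nil => simp [rlGo]
  | cons x xs ih =>
    simp only [List.foldl_cons, rlGo]
    split_ifs with h1 h2
    · simp [ih]
    · simp [ih]
    · simp [ih]

theorem remove_largest_alt_eq (lst : List Int) (value : Int) :
    remove_largest_alt lst value =
      if value ∈ lst then rlGo value lst false else [] := by
  unfold remove_largest_alt
  split_ifs with h
  · simpa using rlGo_foldl value lst [] false
  · rfl

theorem rlGo_true_of_le (value : Int) (l : List Int) (hle : ∀ x ∈ l, x ≤ value) :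
    rlGo value l true = l := by
  induction l with
  | nil => rfl
  | cons x xs ih =>
    have hx : ¬ value < x := not_lt.mpr (hle x (by simp))
    simp [rlGo, hx, ih (fun y hy => hle y (by simp [hy]))]

theorem rlGo_false_of_le (value : Int) (l : List Int)
    (hmem : value ∈ l) (hle : ∀ x ∈ l, x ≤ value) :
    rlGo value l false = l.erase value := by
  induction l with
  | nil => simp at hmem
  | cons x xs ih =>
    by_cases hx : x = value
    · have hvx : ¬ value < x := by simp [hx]
      have hstep : rlGo value (x :: xs) false = rlGo value xs true := by
        simp [rlGo, hx]
      rw [hstep, rlGo_true_of_le value xs (fun y hy => hle y (by simp [hy]))]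
      simp [hx]
    · have hxle : x ≤ value := hle x (by simp)
      have hvx : ¬ value < x := not_lt.mpr hxle
      have hmem' : value ∈ xs := by
        rcases List.mem_cons.mp hmem with h | h
        · exact absurd h.symm hx
        · exact h
      have herase : (x :: xs).erase value = x :: xs.erase value := by
        rw [List.erase_cons_tail]; simp [hx]
      simp [rlGo, hvx, hx, herase, ih hmem' (fun y hy => hle y (by simp [hy]))]

theorem rlGo_erase_of_gt (value m : Int) (hm : value < m) (l : List Int) (b : Bool) :
    rlGo value (l.erase m) b = rlGo value l b := by
  induction l generalizing b with
  | nil => rfl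
  | cons x xs ih =>
    by_cases hx : x = m
    · subst hx
      simp [List.erase_cons_head, rlGo, hm]
    · have herase : (x :: xs).erase m = x :: xs.erase m := by
        rw [List.erase_cons_tail]; simp [hx]
      rw [herase]
      simp only [rlGo]
      split_ifs with h1 h2
      · exact ih b
      · exact ih true
      · rw [ih b]

theorem remove_largest_unfold (lst : List Int) (value largest : Int) (rest : List Int)
    (hnil : ¬ lst = []) (h1 : PySem.List.max? lst (fun x => x) = some largest)
    (h2 : PySem.List.remove? lst largest = some rest) :
    remove_largest lst value = if largest = value then rest else remove_largest rest value := by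
  rw [remove_largest, dif_neg hnil]
  split
  next h => rw [h1] at h; cases h
  next l h =>
    rw [h1] at h; injection h with h; subst h
    split
    next h' => rw [h2] at h'; cases h'
    next r h' => rw [h2] at h'; injection h' with h'; subst h'; rfl

theorem remove_largest_eq (lst : List Int) (value : Int) :
    remove_largest lst value = if value ∈ lst then rlGo value lst false else [] := by
  induction lst using remove_largest.induct (value := value) with
  | case1 =>
    simp [remove_largest]
  | case2 lst hnil h1 =>
    exact absurd ((PySem.List.max?_eq_none_iff lst (fun x => x)).mp h1) hnil
  | case3 lst hnil largest h1 h2 =>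
    have hm : largest ∈ lst := PySem.List.max?_mem h1
    have := PySem.List.remove?_eq_some_erase lst largest hm
    rw [h2] at this; exact absurd this (by simp)
  | case4 lst hnil rest h1 h2 =>
    have hm : value ∈ lst := PySem.List.max?_mem h1
    have hrest : rest = lst.erase value := by
      have := PySem.List.remove?_eq_some_erase lst value hm
      rw [h2] at this; exact Option.some.inj this
    have hle : ∀ x ∈ lst, x ≤ value := fun y hy => PySem.List.max?_isMax h1 y hy
    rw [remove_largest_unfold lst value value rest hnil h1 h2, if_pos rfl]
    rw [if_pos hm, rlGo_false_of_le value lst hm hle, hrest]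
  | case5 lst hnil largest h1 rest h2 hne ih =>
    have hm : largest ∈ lst := PySem.List.max?_mem h1
    have hrest : rest = lst.erase largest := by
      have := PySem.List.remove?_eq_some_erase lst largest hm
      rw [h2] at this; exact Option.some.inj this
    have hle : ∀ x ∈ lst, x ≤ largest := fun y hy => PySem.List.max?_isMax h1 y hy
    rw [remove_largest_unfold lst value largest rest hnil h1 h2, if_neg hne]
    rw [ih]
    by_cases hv : value ∈ lst
    · have hlt : value < largest := lt_of_le_of_ne (hle value hv) (fun h => hne h.symm)
      have hv' : value ∈ rest := by
        rw [hrest]; exact (List.mem_erase_of_ne (fun h => hne h.symm)).mpr hv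
      rw [if_pos hv', if_pos hv, hrest, rlGo_erase_of_gt value largest hlt]
    · have hv' : value ∉ rest := fun h => hv (by rw [hrest] at h; exact List.mem_of_mem_erase h)
      rw [if_neg hv', if_neg hv]

-- ===== VERDICT (by name: the statement is the Claim_ definition above) =====
theorem remove_largest_spec : Claim_equal_remove_largest := by
  intro lst value _
  unfold Spec_remove_largest
  rw [remove_largest_eq, remove_largest_alt_eq]
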